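-- pv_equiv track=rewrite | github.com/Sheep-s4n/Chemical-music | src/LED_animations/wipe.py | white_wipe
-- ===== SOURCE A (Python) =====
-- def white_wipe(num_leds):
--     """
--     Generator that yields frames for a 'progressive white fill' animation.
--     Each LED turns white one after another.
--     """
--     # Start fully black
--     frame = [(0, 0, 0, 0) for _ in range(num_leds)]
--     yield frame.copy() # the first iteration explicitly initializes the strip to black
--
--     for i in range(0, num_leds, 4):  # step of 4
--         for j in range(4):          # fill a block of 4 LEDs
--             if i + j < num_leds:
--                 frame[i + j] = (255, 255, 255, 100)
--
--         yield frame.copy()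
-- ===== SOURCE B (Python) =====
-- def white_wipe(num_leds):
--     """
--     Generator that yields frames for a 'progressive white fill' animation.
--     Each LED turns white one after another.
--     """
--     # First frame: all black.
--     yield [(0, 0, 0, 0)] * num_leds
--     # Each later frame is rebuilt from scratch from its white prefix length.
--     for i in range(0, num_leds, 4):
--         white = min(i + 4, num_leds)
--         yield [(255, 255, 255, 100)] * white + [(0, 0, 0, 0)] * (num_leds - white)
-- ===== Notes on version B (the rewrite author's own statement) =====
-- stated objective: simpler
-- what changed: B drops the mutated shared frame and its per-step copies: every frame is rebuilt statelessly as two replicated blocks from its white prefix length, the block start plus four capped at num_leds, instead of mutating four cells of a shared list and shallow-copying it.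
import Mathlib
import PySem

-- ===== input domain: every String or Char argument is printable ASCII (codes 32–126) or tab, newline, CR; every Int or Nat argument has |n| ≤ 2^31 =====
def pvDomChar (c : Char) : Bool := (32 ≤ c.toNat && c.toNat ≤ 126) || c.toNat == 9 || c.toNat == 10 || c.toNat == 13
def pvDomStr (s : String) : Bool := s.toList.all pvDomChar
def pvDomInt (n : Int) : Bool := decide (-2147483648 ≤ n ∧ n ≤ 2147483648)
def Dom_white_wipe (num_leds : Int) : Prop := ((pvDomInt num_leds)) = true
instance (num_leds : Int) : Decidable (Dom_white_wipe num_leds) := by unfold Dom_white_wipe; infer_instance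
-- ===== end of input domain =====

-- B rebuilds each frame statelessly from its white-prefix length instead of mutating and copying a shared frame list (simpler decomposition).


-- ===== PORT A =====
-- inner 'for j in range(4): if i + j < num_leds: frame[i+j] = (255,255,255,100)'
def wipeBlockA (num_leds : Int) (frame : List (Int × Int × Int × Int)) (i : Int) :
    List (Int × Int × Int × Int) :=
  (PySem.List.pyRange 0 4 1).foldl
    (fun fr j => if i + j < num_leds then PySem.List.pySetD fr (i + j) (255, 255, 255, 100) else fr)
    frame

def white_wipe (num_leds : Int) : List (List (Int × Int × Int × Int)) :=
  let frame := (PySem.List.pyRange 0 num_leds 1).map (fun _ => ((0, 0, 0, 0) : Int × Int × Int × Int))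
  let res := (PySem.List.pyRange 0 num_leds 4).foldl
    (fun (st : List (List (Int × Int × Int × Int)) × List (Int × Int × Int × Int)) i =>
      let fr := wipeBlockA num_leds st.2 i
      (st.1 ++ [fr], fr))
    ([frame], frame)
  res.1

-- ===== PORT B =====
def white_wipe_alt (num_leds : Int) : List (List (Int × Int × Int × Int)) :=
  List.replicate num_leds.toNat (0, 0, 0, 0) ::
    (PySem.List.pyRange 0 num_leds 4).map (fun i =>
      let white := min (i + 4) num_leds
      List.replicate white.toNat (255, 255, 255, 100) ++
        List.replicate (num_leds - white).toNat (0, 0, 0, 0))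

-- ===== PRECONDITION & SPEC =====
def Spec_white_wipe (num_leds : Int) (out : List (List (Int × Int × Int × Int))) : Prop := out = white_wipe_alt num_leds
instance (num_leds : Int) (out : List (List (Int × Int × Int × Int))) : Decidable (Spec_white_wipe num_leds out) := by unfold Spec_white_wipe; infer_instance

-- ===== CLAIM (what is proved, stated in full; the proofs are below) =====
def Claim_equal_white_wipe : Prop := ∀ (num_leds : Int), Dom_white_wipe num_leds → Spec_white_wipe num_leds (white_wipe num_leds)

-- ===== LEMMAS AND PROOFS =====

-- the frame with a white prefix of length w (0 ≤ w ≤ n)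
def wFrame (n w : Int) : List (Int × Int × Int × Int) :=
  List.replicate w.toNat (255, 255, 255, 100) ++ List.replicate (n - w).toNat (0, 0, 0, 0)

theorem pyRange_four_eq_nil (a b : Int) (h : b ≤ a) : PySem.List.pyRange a b 4 = [] := by
  rw [PySem.List.pyRange_of_pos a b (by norm_num)]
  simp [show ¬ a < b by omega]

theorem pyRange_four_cons (a b : Int) (h : a < b) :
    PySem.List.pyRange a b 4 = a :: PySem.List.pyRange (a + 4) b 4 := by
  rw [PySem.List.pyRange_of_pos a b (by norm_num), PySem.List.pyRange_of_pos (a + 4) b (by norm_num)]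
  by_cases h4 : a + 4 < b
  · have hm : ((b - a + 4 - 1) / 4).toNat = ((b - (a + 4) + 4 - 1) / 4).toNat + 1 := by omega
    simp only [if_pos h, if_pos h4, hm, List.range_succ_eq_map, List.map_cons, List.map_map]
    congr 1
    · norm_num
    · apply List.map_congr_left
      intro k _
      simp only [Function.comp]
      push_cast
      ring
  · have hm : ((b - a + 4 - 1) / 4).toNat = 1 := by omega
    simp [if_pos h, if_neg h4, hm, List.range_succ]

theorem set_replicate_append (a : Nat) (x y v : Int × Int × Int × Int) (l : List (Int × Int × Int × Int)) :
    (List.replicate a x ++ y :: l).set a v = List.replicate a x ++ v :: l := by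
  induction a with
  | zero => simp
  | succ a ih => simp [List.replicate_succ, ih]

-- one LED: setting position w of a w-white frame (guarded by w < n) advances the prefix to min (w+1) n
theorem step_one (n w : Int) (h0 : 0 ≤ w) (hw : w ≤ n) :
    (if w < n then PySem.List.pySetD (wFrame n w) w (255, 255, 255, 100) else wFrame n w)
      = wFrame n (min (w + 1) n) := by
  by_cases h : w < n
  · rw [if_pos h, PySem.List.pySetD_of_nonneg _ _ h0]
    unfold wFrame
    have h1 : (n - w).toNat = (n - w - 1).toNat + 1 := by omega
    have h2 : min (w + 1) n = w + 1 := by omega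
    have h3 : (w + 1).toNat = w.toNat + 1 := by omega
    have h4 : n - (w + 1) = n - w - 1 := by ring
    rw [h1, h2, h3, h4, List.replicate_succ, set_replicate_append, List.replicate_succ']
    simp
  · rw [if_neg h]
    have : min (w + 1) n = w := by omega
    rw [this]

-- one block of 4: A's inner loop on a w-white frame, w = min i n, yields the (min (i+4) n)-white frame
theorem block_eq (n i : Int) (h0 : 0 ≤ i) :
    wipeBlockA n (wFrame n (min i n)) i = wFrame n (min (i + 4) n) := by
  have hr : PySem.List.pyRange 0 4 1 = [0, 1, 2, 3] := by decide
  unfold wipeBlockA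
  rw [hr]
  simp only [List.foldl_cons, List.foldl_nil]
  have e0 : (if i + 0 < n then PySem.List.pySetD (wFrame n (min i n)) (i + 0) (255,255,255,100) else wFrame n (min i n)) = wFrame n (min (i + 1) n) := by
    by_cases h : i + 0 < n
    · rw [if_pos h]
      have hm : min i n = i := by omega
      rw [hm, show i + 0 = i by ring]
      have hs := step_one n i h0 (by omega)
      rw [if_pos (show i < n by omega)] at hs
      exact hs
    · rw [if_neg h]
      have h1 : min i n = n := by omega
      have h2 : min (i + 1) n = n := by omega
      rw [h1, h2]
  rw [e0]
  have e1 : (if i + 1 < n then PySem.List.pySetD (wFrame n (min (i + 1) n)) (i + 1) (255,255,255,100) else wFrame n (min (i + 1) n)) = wFrame n (min (i + 2) n) := by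
    by_cases h : i + 1 < n
    · rw [if_pos h]
      have hm : min (i + 1) n = i + 1 := by omega
      rw [hm]
      have hs := step_one n (i + 1) (by omega) (by omega)
      rw [if_pos h] at hs
      rw [hs]
      have harg : min (i + 1 + 1) n = min (i + 2) n := by omega
      rw [harg]
    · rw [if_neg h]
      have h1 : min (i + 1) n = n := by omega
      have h2 : min (i + 2) n = n := by omega
      rw [h1, h2]
  rw [e1]
  have e2 : (if i + 2 < n then PySem.List.pySetD (wFrame n (min (i + 2) n)) (i + 2) (255,255,255,100) else wFrame n (min (i + 2) n)) = wFrame n (min (i + 3) n) := by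
    by_cases h : i + 2 < n
    · rw [if_pos h]
      have hm : min (i + 2) n = i + 2 := by omega
      rw [hm]
      have hs := step_one n (i + 2) (by omega) (by omega)
      rw [if_pos h] at hs
      rw [hs]
      have harg : min (i + 2 + 1) n = min (i + 3) n := by omega
      rw [harg]
    · rw [if_neg h]
      have h1 : min (i + 2) n = n := by omega
      have h2 : min (i + 3) n = n := by omega
      rw [h1, h2]
  rw [e2]
  by_cases h : i + 3 < n
  · rw [if_pos h]
    have hm : min (i + 3) n = i + 3 := by omega
    rw [hm]
    have hs := step_one n (i + 3) (by omega) (by omega)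
    rw [if_pos h] at hs
    rw [hs]
    have harg : min (i + 3 + 1) n = min (i + 4) n := by omega
    rw [harg]
  · rw [if_neg h]
    have h1 : min (i + 3) n = n := by omega
    have h2 : min (i + 4) n = n := by omega
    rw [h1, h2]

def bFrame (n : Int) : Int → List (Int × Int × Int × Int) := fun i =>
  let white := min (i + 4) n
  List.replicate white.toNat (255, 255, 255, 100) ++ List.replicate (n - white).toNat (0, 0, 0, 0)

theorem bFrame_eq (n i : Int) : bFrame n i = wFrame n (min (i + 4) n) := rfl

theorem outer_aux (n : Int) : ∀ (k : Nat) (i : Int) (acc : List (List (Int × Int × Int × Int))),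
    0 ≤ i → (n - i).toNat ≤ k →
    ((PySem.List.pyRange i n 4).foldl
        (fun (st : List (List (Int × Int × Int × Int)) × List (Int × Int × Int × Int)) i' =>
          (st.1 ++ [wipeBlockA n st.2 i'], wipeBlockA n st.2 i'))
        (acc, wFrame n (min i n))).1
      = acc ++ (PySem.List.pyRange i n 4).map (bFrame n) := by
  intro k
  induction k with
  | zero =>
    intro i acc h0 hk
    rw [pyRange_four_eq_nil i n (by omega)]
    simp
  | succ k ih =>
    intro i acc h0 hk
    by_cases h : i < n
    · rw [pyRange_four_cons i n h]
      simp only [List.foldl_cons, List.map_cons]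
      rw [block_eq n i h0]
      have := ih (i + 4) (acc ++ [wFrame n (min (i + 4) n)]) (by omega) (by omega)
      rw [this, bFrame_eq]
      simp
    · rw [pyRange_four_eq_nil i n (by omega)]
      simp

theorem init_frame (n : Int) :
    (PySem.List.pyRange 0 n 1).map (fun _ => ((0, 0, 0, 0) : Int × Int × Int × Int))
      = wFrame n 0 := by
  unfold wFrame
  rw [List.map_const']
  simp [PySem.List.length_pyRange_one]

-- ===== VERDICT (by name: the statement is the Claim_ definition above) =====
theorem white_wipe_spec : Claim_equal_white_wipe := by
  intro n _
  unfold Spec_white_wipe white_wipe white_wipe_alt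
  simp only [init_frame]
  by_cases hn : 0 ≤ n
  · have h0 : min (0 : Int) n = 0 := by omega
    have := outer_aux n n.toNat 0 [wFrame n 0] (le_refl 0) (by omega)
    rw [h0] at this
    rw [this]
    have hw0 : wFrame n 0 = List.replicate n.toNat (0, 0, 0, 0) := by
      unfold wFrame; simp
    rw [hw0]
    rfl
  · rw [pyRange_four_eq_nil 0 n (by omega)]
    unfold wFrame
    simp [show n.toNat = 0 by omega]
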